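-- pv_equiv track=rewrite | github.com/muhamad-uzair/Imperfection-Tolerant-VS-designs | Injection.py | parse_node_blocks
-- ===== SOURCE A (Python) =====
-- def parse_node_blocks(lines):
--     blocks = []
--     i = 0
--     n = len(lines)
--     while i < n:
--         if lines[i].lstrip().startswith("*Node"):
--             j = i + 1
--             while j < n and not lines[j].lstrip().startswith("*"):
--                 j += 1
--             blocks.append((i, j))
--             i = j
--         else:
--             i += 1
--     return blocks
-- ===== SOURCE B (Python) =====
-- def parse_node_blocks(lines):
--     n = len(lines)
--     stars = [i for i in range(n) if lines[i].lstrip().startswith("*")]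
--     stars.append(n)
--     return [(a, b) for a, b in zip(stars, stars[1:])
--             if lines[a].lstrip().startswith("*Node")]
-- ===== Notes on version B (the rewrite author's own statement) =====
-- stated objective: simpler
-- what changed: Replaces the two-pointer nested while-loop with one pass that collects all '*'-line indices plus a len(lines) sentinel, then pairs consecutive boundaries and keeps those starting with '*Node'.
import Mathlib
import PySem

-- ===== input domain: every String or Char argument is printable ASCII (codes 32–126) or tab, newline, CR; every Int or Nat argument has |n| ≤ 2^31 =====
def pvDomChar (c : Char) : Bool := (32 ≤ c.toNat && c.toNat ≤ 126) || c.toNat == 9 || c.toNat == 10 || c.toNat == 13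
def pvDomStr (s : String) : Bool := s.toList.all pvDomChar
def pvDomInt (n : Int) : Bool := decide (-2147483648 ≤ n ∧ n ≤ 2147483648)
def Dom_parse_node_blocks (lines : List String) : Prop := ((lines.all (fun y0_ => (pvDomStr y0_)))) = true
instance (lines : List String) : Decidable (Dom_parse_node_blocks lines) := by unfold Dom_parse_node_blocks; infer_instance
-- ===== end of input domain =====

-- B replaces A's two-pointer nested while-loop with a boundary table of '*'-line indices
-- (plus a sentinel) walked pairwise; same return value, different decomposition (objective: simpler).

-- ===== PORT A =====
-- lines[i].lstrip().startswith("*") / ("*Node") — shared predicates of both Pythons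
def pvStar (s : String) : Bool := PySem.Str.startswith (PySem.Str.lstrip s) "*"
def pvNode (s : String) : Bool := PySem.Str.startswith (PySem.Str.lstrip s) "*Node"

-- inner while: j += 1 while j < n and not lines[j].lstrip().startswith("*")
def pvScanA (lines : List String) (n j : Nat) : Nat :=
  if h : j < n ∧ ¬ (pvStar (lines.getD j "") = true) then pvScanA lines n (j + 1) else j
termination_by n - j
decreasing_by omega

-- cited by pvLoopA's decreasing_by (the port needs it, so it stays above the claim block)
theorem pvScanA_ge (lines : List String) (n j : Nat) : j ≤ pvScanA lines n j := by
  unfold pvScanA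
  split
  · have := pvScanA_ge lines n (j + 1); omega
  · exact Nat.le_refl j
termination_by n - j
decreasing_by omega

-- outer while over i
def pvLoopA (lines : List String) (n i : Nat) : List (Int × Int) :=
  if h : i < n then
    if pvNode (lines.getD i "") then
      ((i : Int), (pvScanA lines n (i + 1) : Int)) :: pvLoopA lines n (pvScanA lines n (i + 1))
    else
      pvLoopA lines n (i + 1)
  else []
termination_by n - i
decreasing_by
  · have := pvScanA_ge lines n (i + 1); omega
  · omega

def parse_node_blocks (lines : List String) : List (Int × Int) :=
  pvLoopA lines lines.length 0

-- ===== PORT B =====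
def parse_node_blocks_alt (lines : List String) : List (Int × Int) :=
  let n := lines.length
  let stars := ((List.range n).filter (fun i => pvStar (lines.getD i ""))) ++ [n]
  ((stars.zip stars.tail).filter (fun p => pvNode (lines.getD p.1 ""))).map
    (fun p => ((p.1 : Int), (p.2 : Int)))

-- ===== PRECONDITION & SPEC =====
def Spec_parse_node_blocks (lines : List String) (out : List (Int × Int)) : Prop := out = parse_node_blocks_alt lines
instance (lines : List String) (out : List (Int × Int)) : Decidable (Spec_parse_node_blocks lines out) := by unfold Spec_parse_node_blocks; infer_instance

-- ===== CLAIM (what is proved, stated in full; the proofs are below) =====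
def Claim_equal_parse_node_blocks : Prop := ∀ (lines : List String), Dom_parse_node_blocks lines → Spec_parse_node_blocks lines (parse_node_blocks lines)

-- ===== LEMMAS AND PROOFS =====

-- the star indices in [j, n), in increasing order
def pvF (lines : List String) (n j : Nat) : List Nat :=
  (List.range' j (n - j)).filter (fun k => pvStar (lines.getD k ""))

-- pairwise walk over the boundary list with sentinel n
def pvG (lines : List String) (n : Nat) : List Nat → List (Int × Int)
  | [] => []
  | a :: rest =>
      (if pvNode (lines.getD a "") then [((a : Int), ((rest.headD n : Nat) : Int))] else [])
        ++ pvG lines n rest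

theorem pvNode_star (s : String) (h : pvNode s = true) : pvStar s = true := by
  simp only [pvNode, pvStar, PySem.Str.startswith_eq] at *
  rw [PySem.Chars.startswith_iff] at *
  exact List.IsPrefix.trans (by decide) h

theorem pvF_of_ge (lines : List String) (n j : Nat) (h : n ≤ j) : pvF lines n j = [] := by
  unfold pvF
  rw [Nat.sub_eq_zero_of_le h]
  rfl

theorem pvF_of_lt (lines : List String) (n j : Nat) (h : j < n) :
    pvF lines n j =
      if pvStar (lines.getD j "") then j :: pvF lines n (j + 1) else pvF lines n (j + 1) := by
  unfold pvF
  have h1 : n - j = (n - (j + 1)) + 1 := by omega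
  rw [h1, List.range'_succ, List.filter_cons]

theorem pvScanA_headD (lines : List String) (n j : Nat) (h : j ≤ n) :
    pvScanA lines n j = (pvF lines n j).headD n := by
  unfold pvScanA
  split
  · rename_i hc
    rw [pvScanA_headD lines n (j + 1) (by omega), pvF_of_lt lines n j hc.1, if_neg hc.2]
  · rename_i hc
    by_cases hj : j < n
    · have hs : pvStar (lines.getD j "") = true := by
        by_contra hns
        exact hc ⟨hj, by simp_all⟩
      rw [pvF_of_lt lines n j hj, if_pos hs, List.headD_cons]
    · have : j = n := by omega
      rw [pvF_of_ge lines n j (by omega), List.headD_nil]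
      omega
termination_by n - j
decreasing_by omega

theorem pvF_scanA (lines : List String) (n j : Nat) (h : j ≤ n) :
    pvF lines n (pvScanA lines n j) = pvF lines n j := by
  unfold pvScanA
  split
  · rename_i hc
    rw [pvF_scanA lines n (j + 1) (by omega), pvF_of_lt lines n j hc.1, if_neg hc.2]
  · rfl
termination_by n - j
decreasing_by omega

theorem pvLoopA_eq_pvG (lines : List String) (n i : Nat) :
    pvLoopA lines n i = pvG lines n (pvF lines n i) := by
  unfold pvLoopA
  split
  · rename_i hi
    by_cases hnode : pvNode (lines.getD i "") = true
    · have hstar : pvStar (lines.getD i "") = true := pvNode_star _ hnode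
      rw [if_pos hnode, pvLoopA_eq_pvG lines n (pvScanA lines n (i + 1)),
          pvF_scanA lines n (i + 1) (by omega),
          pvF_of_lt lines n i hi, if_pos hstar]
      simp only [pvG]
      rw [if_pos hnode, List.singleton_append, pvScanA_headD lines n (i + 1) (by omega)]
    · rw [if_neg hnode, pvLoopA_eq_pvG lines n (i + 1)]
      by_cases hstar : pvStar (lines.getD i "") = true
      · rw [pvF_of_lt lines n i hi, if_pos hstar]
        simp only [pvG]
        rw [if_neg hnode, List.nil_append]
      · rw [pvF_of_lt lines n i hi, if_neg hstar]
  · rename_i hi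
    rw [pvF_of_ge lines n i (by omega)]
    rfl
termination_by n - i
decreasing_by
  · have := pvScanA_ge lines n (i + 1); omega
  · omega

theorem pvZip_eq_pvG (lines : List String) (n : Nat) (s : List Nat) :
    (((s ++ [n]).zip (s ++ [n]).tail).filter (fun p => pvNode (lines.getD p.1 ""))).map
        (fun p => ((p.1 : Int), (p.2 : Int))) = pvG lines n s := by
  induction s with
  | nil => rfl
  | cons a s ih =>
    cases s with
    | nil =>
      by_cases hnode : pvNode (lines.getD a "") = true
      all_goals
        simp only [List.getD_eq_getElem?_getD] at hnode
        simp [pvG, hnode, List.getD_eq_getElem?_getD]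
    | cons b s' =>
      simp only [List.cons_append, List.tail_cons, List.zip_cons_cons, List.filter_cons] at ih ⊢
      conv_rhs => rw [pvG]
      rw [List.headD_cons, ← ih]
      by_cases hnode : pvNode (lines.getD a "") = true
      all_goals
        simp only [List.getD_eq_getElem?_getD] at hnode
        simp [hnode]

-- ===== VERDICT (by name: the statement is the Claim_ definition above) =====
theorem parse_node_blocks_spec : Claim_equal_parse_node_blocks := by
  intro lines _
  unfold Spec_parse_node_blocks parse_node_blocks parse_node_blocks_alt
  rw [pvLoopA_eq_pvG, pvZip_eq_pvG]
  unfold pvF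
  rw [List.range_eq_range', Nat.sub_zero]
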